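-- pv_equiv track=rewrite | github.com/FlagTech/TOEIC_Quiz_Generator | backend/routers/reading.py | calculate_multiple_passage_distribution
-- ===== SOURCE A (Python) =====
-- from typing import List, Dict, Optional, Any
--
-- def calculate_multiple_passage_distribution(total_count: int) -> List[int]:
--     """
--     計算多篇閱讀的題目分配
--     每組最少3題，最多5題（每組包含2-3篇相關文章）
--
--     Args:
--         total_count: 總題數
--
--     Returns:
--         題目分配列表，例如 [5, 4] 表示第一組5題，第二組4題
--     """
--     if total_count < 3:
--         return []
--
--     # 計算需要幾組文章（每組最多5題）
--     import math
--     group_count = math.ceil(total_count / 5)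
--
--     # 平均分配題目
--     base_questions = total_count // group_count
--     remainder = total_count % group_count
--
--     # 前 remainder 組多分配 1 題
--     distribution = []
--     for i in range(group_count):
--         questions = base_questions + (1 if i < remainder else 0)
--         distribution.append(questions)
--
--     return distribution
-- ===== SOURCE B (Python) =====
-- import math
--
-- def calculate_multiple_passage_distribution(total_count: int):
--     if total_count < 3:
--         return []
--     group_count = math.ceil(total_count / 5)
--     # round-robin: deal each question to the groups in turn
--     distribution = [0] * group_count
--     for q in range(total_count):
--         distribution[q % group_count] += 1
--     return distribution
-- ===== Notes on version B (the rewrite author's own statement) =====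
-- stated objective: alternative
-- what changed: Replaces the base/remainder arithmetic and per-group loop with a round-robin accumulation that deals each of the total_count questions into per-group counters (distribution[q % group_count] += 1), traversing questions instead of groups.
import Mathlib
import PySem

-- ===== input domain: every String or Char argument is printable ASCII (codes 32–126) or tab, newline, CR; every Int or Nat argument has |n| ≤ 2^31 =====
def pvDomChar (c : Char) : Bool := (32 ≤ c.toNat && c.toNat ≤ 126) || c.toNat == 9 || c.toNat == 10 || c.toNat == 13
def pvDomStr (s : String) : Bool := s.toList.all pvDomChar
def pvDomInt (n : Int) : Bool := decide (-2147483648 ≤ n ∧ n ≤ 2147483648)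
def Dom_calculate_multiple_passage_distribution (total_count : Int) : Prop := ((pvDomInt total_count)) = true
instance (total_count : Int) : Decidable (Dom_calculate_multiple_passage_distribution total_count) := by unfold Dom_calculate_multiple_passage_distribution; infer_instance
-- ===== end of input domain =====

-- B replaces the base/remainder per-group loop by a round-robin deal over the questions (alternative decomposition).
-- ===== PORT A =====
def calculate_multiple_passage_distribution (total_count : Int) : List Int :=
  if total_count < 3 then []
  else
    -- math.ceil(total_count / 5): integer ceiling division, exact here since |total_count| ≤ 2^31 < 2^53
    let group_count : Int := -(PySem.Int.floordiv (-total_count) 5)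
    let base_questions : Int := PySem.Int.floordiv total_count group_count
    let remainder : Int := PySem.Int.mod total_count group_count
    (PySem.List.pyRange 0 group_count 1).foldl
      (fun distribution i =>
        distribution ++ [base_questions + (if i < remainder then 1 else 0)]) []

-- ===== PORT B =====
def calculate_multiple_passage_distribution_alt (total_count : Int) : List Int :=
  if total_count < 3 then []
  else
    let group_count : Int := -(PySem.Int.floordiv (-total_count) 5)
    -- distribution[q % group_count] += 1 : the index q % group_count is always in range
    (PySem.List.pyRange 0 total_count 1).foldl
      (fun distribution q =>
        distribution.set (PySem.Int.mod q group_count).toNat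
          (PySem.List.pyGetD distribution (PySem.Int.mod q group_count) 0 + 1))
      (List.replicate group_count.toNat 0)

-- ===== PRECONDITION & SPEC =====
def Spec_calculate_multiple_passage_distribution (total_count : Int) (out : List Int) : Prop := out = calculate_multiple_passage_distribution_alt total_count
instance (total_count : Int) (out : List Int) : Decidable (Spec_calculate_multiple_passage_distribution total_count out) := by unfold Spec_calculate_multiple_passage_distribution; infer_instance

-- ===== CLAIM (what is proved, stated in full; the proofs are below) =====
def Claim_equal_calculate_multiple_passage_distribution : Prop := ∀ (total_count : Int), Dom_calculate_multiple_passage_distribution total_count → Spec_calculate_multiple_passage_distribution total_count (calculate_multiple_passage_distribution total_count)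

-- ===== LEMMAS AND PROOFS =====



-- model: the per-group counts after dealing k questions round-robin over g groups
def pvModel (g k : Int) : List Int :=
  (List.range g.toNat).map
    (fun (j : Nat) => PySem.Int.floordiv k g + if (j : Int) < PySem.Int.mod k g then 1 else 0)

lemma pvModel_length (g k : Int) : (pvModel g k).length = g.toNat := by
  simp [pvModel]

lemma pvModel_getElem (g k : Int) (j : Nat) (hj : j < g.toNat) :
    (pvModel g k)[j]'(by simpa [pvModel_length] using hj) =
      PySem.Int.floordiv k g + if (j : Int) < PySem.Int.mod k g then 1 else 0 := by
  simp [pvModel]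

lemma pvModel_zero (g : Int) (hg : 0 < g) : pvModel g 0 = List.replicate g.toNat 0 := by
  have h1 : PySem.Int.floordiv 0 g = 0 := by
    rw [PySem.Int.floordiv_eq_ediv_of_pos hg]; simp
  have h2 : PySem.Int.mod 0 g = 0 := by
    rw [PySem.Int.mod_eq_emod_of_pos hg]; simp
  apply List.ext_getElem
  · simp [pvModel_length]
  · intro j hj1 hj2
    rw [pvModel_getElem g 0 j (by simpa [pvModel_length] using hj1)]
    simp [h1, h2, Int.not_lt.mpr (Int.natCast_nonneg j)]

lemma pvModel_step (g k : Int) (hg : 0 < g) :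
    (pvModel g k).set (PySem.Int.mod k g).toNat
      (PySem.List.pyGetD (pvModel g k) (PySem.Int.mod k g) 0 + 1) = pvModel g (k + 1) := by
  have key : PySem.Int.floordiv k g * g + PySem.Int.mod k g = k :=
    PySem.Int.floordiv_mul_add_mod k g
  have hm0 : 0 ≤ PySem.Int.mod k g := PySem.Int.mod_nonneg k hg
  have hmlt : PySem.Int.mod k g < g := PySem.Int.mod_lt k hg
  set q := PySem.Int.floordiv k g with hq
  set m := PySem.Int.mod k g with hm
  have hmnat : ((m.toNat : Int)) = m := Int.toNat_of_nonneg hm0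
  have hval : PySem.List.pyGetD (pvModel g k) m 0 = q := by
    have hlen : m < ((pvModel g k).length : Int) := by
      rw [pvModel_length]; omega
    rw [PySem.List.pyGetD_eq_getElem _ _ hm0 hlen]
    rw [pvModel_getElem g k m.toNat (by omega)]
    rw [hmnat, ← hq, ← hm]
    simp
  rw [hval]
  have hstep : (PySem.Int.floordiv (k+1) g = q + 1 ∧ PySem.Int.mod (k+1) g = 0 ∧ m = g - 1) ∨
      (PySem.Int.floordiv (k+1) g = q ∧ PySem.Int.mod (k+1) g = m + 1 ∧ m < g - 1) := by
    by_cases hcase : m = g - 1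
    · left
      have h1 : PySem.Int.floordiv (k+1) g = q + 1 := by
        rw [PySem.Int.floordiv_eq_iff_of_pos hg]
        constructor <;> nlinarith
      refine ⟨h1, ?_, hcase⟩
      have h5 := PySem.Int.floordiv_mul_add_mod (k+1) g
      rw [h1] at h5; nlinarith
    · right
      have h4 : m ≤ g - 2 := by omega
      have h1 : PySem.Int.floordiv (k+1) g = q := by
        rw [PySem.Int.floordiv_eq_iff_of_pos hg]
        constructor <;> nlinarith
      refine ⟨h1, ?_, by omega⟩
      have h5 := PySem.Int.floordiv_mul_add_mod (k+1) g
      rw [h1] at h5; nlinarith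
  apply List.ext_getElem
  · simp [pvModel_length]
  · intro j hj1 hj2
    have hjlt : j < g.toNat := by simpa [pvModel_length] using hj2
    rw [List.getElem_set, pvModel_getElem g (k+1) j hjlt]
    by_cases hje : m.toNat = j
    · rw [if_pos hje]
      rcases hstep with ⟨h1, h2, h3⟩ | ⟨h1, h2, h3⟩ <;> rw [h1, h2] <;> split_ifs <;> omega
    · rw [if_neg hje, pvModel_getElem g k j hjlt, ← hq, ← hm]
      have hjm : (j : Int) ≠ m := by omega
      have hjg : (j : Int) < g := by omega
      rcases hstep with ⟨h1, h2, h3⟩ | ⟨h1, h2, h3⟩ <;> rw [h1, h2] <;> split_ifs <;> omega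

lemma bfold (g : Int) (hg : 0 < g) : ∀ (k : Int), 0 ≤ k →
    (PySem.List.pyRange 0 k 1).foldl
      (fun distribution q =>
        distribution.set (PySem.Int.mod q g).toNat
          (PySem.List.pyGetD distribution (PySem.Int.mod q g) 0 + 1))
      (List.replicate g.toNat 0) = pvModel g k := by
  intro k hk
  induction k, hk using Int.le_induction with
  | base =>
      rw [PySem.List.pyRange_one_eq_nil le_rfl]
      simp [pvModel_zero g hg]
  | succ k hk ih =>
      rw [PySem.List.pyRange_one_succ_right hk, List.foldl_append, ih]
      simpa using pvModel_step g k hg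

lemma afold (g t : Int) :
    (PySem.List.pyRange 0 g 1).foldl
      (fun distribution i =>
        distribution ++ [PySem.Int.floordiv t g + (if i < PySem.Int.mod t g then 1 else 0)]) []
    = pvModel g t := by
  rw [PySem.List.foldl_append_singleton_eq_map, List.nil_append,
    PySem.List.pyRange_zero, List.map_map, pvModel]
  rfl

-- ===== VERDICT (by name: the statement is the Claim_ definition above) =====
theorem calculate_multiple_passage_distribution_spec : Claim_equal_calculate_multiple_passage_distribution := by
  intro t _
  unfold Spec_calculate_multiple_passage_distribution
  unfold calculate_multiple_passage_distribution calculate_multiple_passage_distribution_alt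
  by_cases h : t < 3
  · simp [h]
  · simp only [h, if_false]
    have ht : 3 ≤ t := by omega
    have hg : 0 < -(PySem.Int.floordiv (-t) 5) := by
      rw [PySem.Int.floordiv_eq_ediv_of_pos (by omega : (0:Int) < 5)]
      omega
    rw [afold, bfold _ hg t (by omega)]
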